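-- pv_equiv track=rewrite | github.com/tripster202/playground | webkinz_gumball/base_gumball.py | grr_machine
-- ===== SOURCE A (Python) =====
-- def grr_machine(guess, control):
--     g = list(guess)
--     c = list(control)
--
--     # Check for numbers in the correct position --> G
--     num_exact_matches = sum(1 for gg, cc in zip(g, c) if gg == cc)
--     # If g = ['0', '1', '8'] and c = ['0', '1', '4']:
--     # zip(g, c) → [('0', '0'), ('1', '1'), ('8', '4')]
--     # Matches: '0' == '0' (True), '1' == '1' (True), '8' == '4' (False)
--     # sum(1 for ...) → 1 + 1 = 2
--     # Result: num_exact_matches = 2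
--
--     # Check for numbers that are in the wrong position --> R
--     # produces a list of numbers from g that exist but are not in the same position as c
--     partial_matches_gg = [gg for gg, cc in zip(g, c) if gg != cc]
--     partial_matches_cc = [cc for gg, cc in zip(g, c) if gg != cc]
--     num_partial_matches = sum(min(partial_matches_gg.count(match), partial_matches_cc.count(match)) for match in set(partial_matches_gg))
--     # for each match in partial_matches_gg, count the number of times it appears in both lists
--     # and take the minimum of the two counts to avoid double counting
--
--     return 'g' * num_exact_matches + 'r' * num_partial_matches if (num_exact_matches + num_partial_matches) else 'x'
-- ===== SOURCE B (Python) =====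
-- def grr_machine(guess, control):
--     # One zip pass splits positions into exact matches and two leftover lists;
--     # the leftover lists are sorted and a two-pointer merge counts, pair by
--     # pair, the common characters (no occurrence counting, no set of values).
--     exact = 0
--     mis_g = []
--     mis_c = []
--     for a, b in zip(guess, control):
--         if a == b:
--             exact += 1
--         else:
--             mis_g.append(a)
--             mis_c.append(b)
--     mis_g.sort()
--     mis_c.sort()
--     i = j = partial = 0
--     while i < len(mis_g) and j < len(mis_c):
--         if mis_g[i] == mis_c[j]:
--             partial += 1
--             i += 1
--             j += 1
--         elif mis_g[i] < mis_c[j]: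
--             i += 1
--         else:
--             j += 1
--     return 'g' * exact + 'r' * partial if exact + partial else 'x'
-- ===== Notes on version B (the rewrite author's own statement) =====
-- stated objective: alternative
-- what changed: Replaces A's counting approach (sum over set(pgg) of min of list.count over both mismatch lists) by sort-then-merge: one zip pass splits positions into exact matches and two leftover lists, which are sorted and scanned once with two pointers to count misplaced pairs.
import Mathlib
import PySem

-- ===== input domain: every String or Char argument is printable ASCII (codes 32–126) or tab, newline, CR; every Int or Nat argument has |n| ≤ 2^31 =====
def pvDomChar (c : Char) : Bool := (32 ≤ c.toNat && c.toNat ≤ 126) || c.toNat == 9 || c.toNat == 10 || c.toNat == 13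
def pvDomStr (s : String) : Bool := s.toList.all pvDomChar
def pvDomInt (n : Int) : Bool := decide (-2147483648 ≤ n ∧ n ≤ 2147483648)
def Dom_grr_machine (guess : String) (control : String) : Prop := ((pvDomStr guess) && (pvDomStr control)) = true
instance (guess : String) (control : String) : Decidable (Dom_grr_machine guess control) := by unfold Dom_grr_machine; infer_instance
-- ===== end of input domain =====

-- B replaces A's per-character min-of-count sum over the mismatch lists by a sort-then-merge
-- scan (sort both leftover lists, count common chars with two pointers); same return value.


-- ===== PORT A =====
-- A: three zip comprehensions; misplaced count = sum over set(pgg) of min of list.count in both mismatch lists.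
def grr_machine (guess : String) (control : String) : String :=
  let g := guess.toList
  let c := control.toList
  let pairs := g.zip c
  let numExact : Int := pairs.foldl (fun acc p => if p.1 = p.2 then acc + 1 else acc) 0
  let pgg := (pairs.filter (fun p => p.1 != p.2)).map Prod.fst
  let pcc := (pairs.filter (fun p => p.1 != p.2)).map Prod.snd
  let numPartial : Int := (PySem.Set.ofList pgg).foldl
      (fun acc m => acc + min ((pgg.count m : Int)) ((pcc.count m : Int))) 0
  if numExact + numPartial ≠ 0 then
    String.mk (List.replicate numExact.toNat 'g' ++ List.replicate numPartial.toNat 'r')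
  else "x"

-- ===== PORT B =====
-- B: one zip pass splits positions into exact matches and two leftover lists; the leftover
-- lists are sorted and a two-pointer merge (pvMerge, the while loop on suffixes) counts pairs.
def pvMerge : List Char → List Char → Int
  | [], _ => 0
  | _ :: _, [] => 0
  | x :: xs, y :: ys =>
      if x = y then 1 + pvMerge xs ys
      else if x < y then pvMerge xs (y :: ys)
      else pvMerge (x :: xs) ys
termination_by xs ys => xs.length + ys.length

def grr_machine_alt (guess : String) (control : String) : String :=
  let st := (guess.toList.zip control.toList).foldl
      (fun (s : Int × List Char × List Char) p =>
        if p.1 = p.2 then (s.1 + 1, s.2) else (s.1, s.2.1 ++ [p.1], s.2.2 ++ [p.2]))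
      (0, [], [])
  let sg := PySem.List.sorted st.2.1 (fun x => x) false
  let sc := PySem.List.sorted st.2.2 (fun x => x) false
  let numPartial := pvMerge sg sc
  if st.1 + numPartial ≠ 0 then
    String.mk (List.replicate st.1.toNat 'g' ++ List.replicate numPartial.toNat 'r')
  else "x"

-- ===== PRECONDITION & SPEC =====
def Spec_grr_machine (guess : String) (control : String) (out : String) : Prop := out = grr_machine_alt guess control
instance (guess : String) (control : String) (out : String) : Decidable (Spec_grr_machine guess control out) := by unfold Spec_grr_machine; infer_instance

-- ===== CLAIM (what is proved, stated in full; the proofs are below) =====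
def Claim_equal_grr_machine : Prop := ∀ (guess : String) (control : String), Dom_grr_machine guess control → Spec_grr_machine guess control (grr_machine guess control)

-- ===== LEMMAS AND PROOFS =====

-- B's first loop with three accumulators is the exact-match count plus the two projected mismatch lists.
theorem pvSplitFold (pairs : List (Char × Char)) (e : Int) (lg lc : List Char) :
    pairs.foldl
      (fun (s : Int × List Char × List Char) p =>
        if p.1 = p.2 then (s.1 + 1, s.2) else (s.1, s.2.1 ++ [p.1], s.2.2 ++ [p.2]))
      (e, lg, lc)
    = (pairs.foldl (fun acc p => if p.1 = p.2 then acc + 1 else acc) e,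
       lg ++ (pairs.filter (fun p => p.1 != p.2)).map Prod.fst,
       lc ++ (pairs.filter (fun p => p.1 != p.2)).map Prod.snd) := by
  induction pairs generalizing e lg lc with
  | nil => simp
  | cons p rest ih =>
    simp only [List.foldl_cons]
    by_cases h : p.1 = p.2 <;> simp [h, ih]

-- B's two-pointer merge on the two sorted mismatch lists counts their multiset intersection.
theorem pvMergeCard (xs ys : List Char) (hx : xs.Pairwise (· ≤ ·)) (hy : ys.Pairwise (· ≤ ·)) :
    pvMerge xs ys = (((xs : Multiset Char) ∩ (ys : Multiset Char)).card : Int) := by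
  induction xs, ys using pvMerge.induct with
  | case1 ys => simp [pvMerge]
  | case2 x xs => simp [pvMerge]
  | case3 xs y ys ih =>
    rw [List.pairwise_cons] at hx hy
    have h1 : ((y :: xs : List Char) : Multiset Char) = y ::ₘ (xs : Multiset Char) := rfl
    have h2 : ((y :: ys : List Char) : Multiset Char) = y ::ₘ (ys : Multiset Char) := rfl
    rw [pvMerge, if_pos rfl, ih hx.2 hy.2, h1, h2,
        Multiset.cons_inter_of_pos _ (Multiset.mem_cons_self _ _), Multiset.erase_cons_head,
        Multiset.card_cons]
    push_cast; omega
  | case4 x xs y ys heq hlt ih =>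
    rw [List.pairwise_cons] at hx
    have hnm : x ∉ ((y :: ys : List Char) : Multiset Char) := by
      rw [List.pairwise_cons] at hy
      simp only [Multiset.mem_coe, List.mem_cons]
      rintro (rfl | hmem)
      · exact heq rfl
      · exact absurd (lt_of_lt_of_le hlt (hy.1 _ hmem)) (lt_irrefl x)
    have h1 : ((x :: xs : List Char) : Multiset Char) = x ::ₘ (xs : Multiset Char) := rfl
    rw [pvMerge, if_neg heq, if_pos hlt, ih hx.2 hy, h1,
        Multiset.cons_inter_of_neg _ hnm]
  | case5 x xs y ys heq hlt ih =>
    rw [List.pairwise_cons] at hy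
    have hyx : y < x := by
      rcases lt_trichotomy x y with h | h | h
      · exact absurd h hlt
      · exact absurd h heq
      · exact h
    have hnm : y ∉ ((x :: xs : List Char) : Multiset Char) := by
      rw [List.pairwise_cons] at hx
      simp only [Multiset.mem_coe, List.mem_cons]
      rintro (rfl | hmem)
      · exact lt_irrefl y hyx
      · exact absurd (lt_of_lt_of_le hyx (hx.1 _ hmem)) (lt_irrefl y)
    have h2 : ((y :: ys : List Char) : Multiset Char) = y ::ₘ (ys : Multiset Char) := rfl
    have hdrop : ((x :: xs : List Char) : Multiset Char) ∩ ((y :: ys : List Char) : Multiset Char)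
        = ((x :: xs : List Char) : Multiset Char) ∩ (ys : Multiset Char) := by
      rw [Multiset.inter_comm, h2, Multiset.cons_inter_of_neg _ hnm, Multiset.inter_comm]
    rw [pvMerge, if_neg heq, if_neg hlt, ih hx hy.2, hdrop]

-- A's sum over set(pgg) of min counts is the same multiset-intersection cardinality.
theorem pvMinSum (xs ys : List Char) :
    ((PySem.Set.ofList xs).foldl
        (fun acc m => acc + min ((xs.count m : Int)) ((ys.count m : Int))) 0)
    = (((xs : Multiset Char) ∩ (ys : Multiset Char)).card : Int) := by
  rw [PySem.List.foldl_add]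
  have hnd : (PySem.Set.ofList xs).Nodup := PySem.Set.nodup_ofList xs
  have hfs : (PySem.Set.ofList xs).toFinset = xs.toFinset := by
    ext a; simp [PySem.Set.mem_ofList]
  have hsum : ((PySem.Set.ofList xs).map
      (fun m => min ((xs.count m : Int)) ((ys.count m : Int)))).sum
      = ∑ a ∈ xs.toFinset, min ((xs.count a : Int)) ((ys.count a : Int)) := by
    rw [← hfs, List.sum_toFinset _ hnd]
  rw [hsum]
  have : ∀ a : Char, min ((xs.count a : Int)) ((ys.count a : Int))
      = ((((xs : Multiset Char) ∩ (ys : Multiset Char)).count a : Nat) : Int) := by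
    intro a
    rw [Multiset.count_inter]
    push_cast
    simp
  simp only [this, zero_add]
  rw [← Nat.cast_sum]
  congr 1
  have hcard := Multiset.toFinset_sum_count_eq ((xs : Multiset Char) ∩ (ys : Multiset Char))
  rw [← hcard]
  symm
  apply Finset.sum_subset
  · intro a ha
    have := Multiset.inter_le_left (s := (xs : Multiset Char)) (t := (ys : Multiset Char))
    simp only [Multiset.mem_toFinset, List.mem_toFinset] at ha ⊢
    simpa using Multiset.mem_of_le this ha
  · intro a _ ha
    simp only [Multiset.mem_toFinset] at ha
    exact Multiset.count_eq_zero_of_notMem ha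

-- ===== VERDICT (by name: the statement is the Claim_ definition above) =====
theorem grr_machine_spec : Claim_equal_grr_machine := by
  intro guess control _
  unfold Spec_grr_machine grr_machine grr_machine_alt
  simp only []
  rw [pvSplitFold, pvMinSum]
  have hperm : ∀ (l : List Char),
      ((PySem.List.sorted l (fun x => x) false : List Char) : Multiset Char) = (l : Multiset Char) :=
    fun l => Multiset.coe_eq_coe.mpr (PySem.List.sorted_perm l (fun x => x) false)
  rw [pvMergeCard _ _ (PySem.List.sorted_pairwise _ _) (PySem.List.sorted_pairwise _ _),
      hperm, hperm]
  simp
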